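-- pv_equiv track=rewrite | github.com/Lamd11/alpha-back-verify-service | src/verifier/java_metadata_validator.py | _is_valid_java_class_name
-- ===== SOURCE A (Python) =====
-- def _is_valid_java_class_name(class_name: str) -> bool:
--     """
--     Check if string is a valid Java fully qualified class name
--
--     Args:
--         class_name: Class name to validate
--
--     Returns:
--         True if valid
--     """
--     # Basic validation: should contain at least one dot and valid characters
--     if '.' not in class_name:
--         return False
--
--     parts = class_name.split('.')
--     for part in parts:
--         if not part:  # Empty part
--             return False
--         # Check if part starts with letter and contains only valid Java identifier chars
--         if not part[0].isalpha() and part[0] != '_':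
--             return False
--         if not all(c.isalnum() or c == '_' for c in part):
--             return False
--
--     return True
-- ===== SOURCE B (Python) =====
-- def _is_valid_java_class_name(class_name: str) -> bool:
--     at_start = True
--     seen_dot = False
--     for c in class_name:
--         if c == '.':
--             if at_start:
--                 return False
--             at_start = True
--             seen_dot = True
--         elif at_start:
--             if not (c.isalpha() or c == '_'):
--                 return False
--             at_start = False
--         elif not (c.isalnum() or c == '_'):
--             return False
--     return (not at_start) and seen_dot
-- ===== Notes on version B (the rewrite author's own statement) =====
-- stated objective: alternative
-- what changed: Replaces split-into-parts-then-validate-each-part with a single left-to-right character scan maintaining at_start and seen_dot flags, so no part list is ever built.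
import Mathlib
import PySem

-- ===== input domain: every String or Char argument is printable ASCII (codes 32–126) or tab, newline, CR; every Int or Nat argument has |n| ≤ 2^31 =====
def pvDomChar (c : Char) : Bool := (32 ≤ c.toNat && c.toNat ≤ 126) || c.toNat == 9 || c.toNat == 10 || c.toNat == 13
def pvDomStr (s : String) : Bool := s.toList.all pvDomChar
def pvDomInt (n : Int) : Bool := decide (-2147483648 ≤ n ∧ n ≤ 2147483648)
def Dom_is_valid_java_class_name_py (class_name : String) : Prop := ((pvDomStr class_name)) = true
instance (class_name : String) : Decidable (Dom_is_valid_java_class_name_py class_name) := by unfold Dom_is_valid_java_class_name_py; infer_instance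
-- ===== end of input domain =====

-- B replaces split-into-parts-then-validate-each-part by a single left-to-right scan with at_start/seen_dot flags (alternative decomposition, same O(n) cost).

-- ===== PORT A =====
-- per-part check: 'if not part: return False; if not (part[0].isalpha() or part[0]=='_'): return False; if not all(...): return False'
def pvCheckPart (part : List Char) : Bool :=
  match part with
  | [] => false
  | c :: _ =>
    if !(PySem.Chars.isalpha c) && c != '_' then false
    else part.all (fun d => PySem.Chars.isalnum d || d == '_')

def is_valid_java_class_name_py (class_name : String) : Bool :=
  if !(PySem.Str.isIn "." class_name) then false
  else
    let parts := PySem.Chars.splitOn class_name.toList ['.']   -- class_name.split('.')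
    parts.all pvCheckPart

-- ===== PORT B =====
-- the scan loop of Source B: state (at_start, seen_dot), early returns become 'false'
def pvAltGo : List Char → Bool → Bool → Bool
  | [], atStart, seenDot => !atStart && seenDot
  | c :: rest, atStart, seenDot =>
    if c = '.' then
      if atStart then false else pvAltGo rest true true
    else if atStart then
      if !(PySem.Chars.isalpha c || c == '_') then false else pvAltGo rest false seenDot
    else if !(PySem.Chars.isalnum c || c == '_') then false
    else pvAltGo rest atStart seenDot

def is_valid_java_class_name_py_alt (class_name : String) : Bool :=
  pvAltGo class_name.toList true false

-- ===== PRECONDITION & SPEC =====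
def Spec_is_valid_java_class_name_py (class_name : String) (out : Bool) : Prop := out = is_valid_java_class_name_py_alt class_name
instance (class_name : String) (out : Bool) : Decidable (Spec_is_valid_java_class_name_py class_name out) := by unfold Spec_is_valid_java_class_name_py; infer_instance

-- ===== CLAIM (what is proved, stated in full; the proofs are below) =====
def Claim_equal_is_valid_java_class_name_py : Prop := ∀ (class_name : String), Dom_is_valid_java_class_name_py class_name → Spec_is_valid_java_class_name_py class_name (is_valid_java_class_name_py class_name)

-- ===== LEMMAS AND PROOFS =====

-- structural model of s.split('.'): (first part, remaining parts)
def pvSplitDot : List Char → List Char × List (List Char)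
  | [] => ([], [])
  | c :: rest =>
    let (h, t) := pvSplitDot rest
    if c = '.' then ([], h :: t) else (c :: h, t)

def pvOk (c : Char) : Bool := PySem.Chars.isalnum c || c == '_'

lemma pvGo_spec (fuel : Nat) : ∀ (l cur : List Char) (accs : List (List Char)),
    l.length < fuel →
    PySem.Chars.splitOn.go ['.'] fuel l cur accs =
      accs.reverse ++ (cur.reverse ++ (pvSplitDot l).1) :: (pvSplitDot l).2 := by
  induction fuel with
  | zero => intro l cur accs h; omega
  | succ f ih =>
    intro l cur accs h
    match l with
    | [] => simp [PySem.Chars.splitOn.go, pvSplitDot]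
    | c :: rest =>
      rw [PySem.Chars.splitOn.go]
      by_cases hc : c = '.'
      · subst hc
        simp only [List.length_cons] at *
        simp [ih rest [] _ (by omega), pvSplitDot]
      · have hp : ['.'].isPrefixOf (c :: rest) = false := by
          simp [List.isPrefixOf]; exact fun hh => absurd hh.symm hc
        rw [hp]
        simp only [Bool.false_eq_true, if_false]
        rw [ih rest (c :: cur) accs (by simp at h ⊢; omega)]
        simp [pvSplitDot, hc]

lemma pvSplitOn_eq (cs : List Char) :
    PySem.Chars.splitOn cs ['.'] = (pvSplitDot cs).1 :: (pvSplitDot cs).2 := by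
  rw [PySem.Chars.splitOn, pvGo_spec cs.length.succ cs [] [] (Nat.lt_succ_self _)]
  simp

lemma pvCheckPart_cons (c : Char) (h : List Char) :
    pvCheckPart (c :: h) = ((PySem.Chars.isalpha c || c == '_') && (pvOk c && h.all pvOk)) := by
  show (if !(PySem.Chars.isalpha c) && c != '_' then false
        else (c :: h).all pvOk) = _
  by_cases h1 : PySem.Chars.isalpha c
  · have hok : pvOk c = true := by simp [pvOk, PySem.Chars.isalnum, h1]
    simp [h1, hok]
  · by_cases h2 : c = '_'
    · subst h2
      have hok : pvOk '_' = true := by simp [pvOk]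
      simp [h1, hok]
    · simp [h1, h2]

lemma pvOk_of_head {c : Char} (hh : (PySem.Chars.isalpha c || c == '_') = true) :
    pvOk c = true := by
  rcases Bool.or_eq_true_iff.1 hh with h1 | h1
  · simp [pvOk, PySem.Chars.isalnum, h1]
  · simp [pvOk, h1]

lemma pvAltGo_spec (cs : List Char) : ∀ sd : Bool,
    (pvAltGo cs true sd =
      (pvCheckPart ((pvSplitDot cs).1) && (pvSplitDot cs).2.all pvCheckPart
        && (sd || cs.contains '.'))) ∧
    (pvAltGo cs false sd =
      ((pvSplitDot cs).1.all pvOk && (pvSplitDot cs).2.all pvCheckPart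
        && (sd || cs.contains '.'))) := by
  induction cs with
  | nil => intro sd; simp [pvAltGo, pvSplitDot, pvCheckPart]
  | cons c rest ih =>
    intro sd
    by_cases hc : c = '.'
    · subst hc
      refine ⟨by simp [pvAltGo, pvSplitDot, pvCheckPart], ?_⟩
      rw [show pvAltGo ('.' :: rest) false sd = pvAltGo rest true true from by
        simp [pvAltGo]]
      rw [(ih true).1]
      simp [pvSplitDot]
    · have hcp : pvSplitDot (c :: rest) =
          (c :: (pvSplitDot rest).1, (pvSplitDot rest).2) := by
        simp [pvSplitDot, hc]
      have hmem : ('.' ∈ c :: rest) ↔ ('.' ∈ rest) :=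
        ⟨fun h => (List.mem_cons.1 h).resolve_left (fun h' => hc h'.symm),
         fun h => List.mem_cons_of_mem _ h⟩
      rw [hcp]
      constructor
      · by_cases hh : (PySem.Chars.isalpha c || c == '_') = true
        · have hok := pvOk_of_head hh
          rw [show pvAltGo (c :: rest) true sd = pvAltGo rest false sd from by
            simp [pvAltGo, hc, hh]]
          rw [(ih sd).2, pvCheckPart_cons, hh, hok]
          simp [hmem]
        · have hh' : (PySem.Chars.isalpha c || c == '_') = false := by simpa using hh
          rw [show pvAltGo (c :: rest) true sd = false from by
            simp [pvAltGo, hc, hh']]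
          rw [pvCheckPart_cons, hh']
          simp
      · rw [show pvAltGo (c :: rest) false sd =
            (if !(pvOk c) then false else pvAltGo rest false sd) from by
          simp [pvAltGo, hc, pvOk]]
        cases hok : pvOk c
        · simp [hok]
        · simp only [Bool.not_true, Bool.false_eq_true, if_false]
          rw [(ih sd).2]
          simp [hok, hmem]

lemma pvIsIn_eq (s : String) : PySem.Str.isIn "." s = s.toList.contains '.' := by
  rcases hc : s.toList.contains '.' with _ | _
  · rw [Bool.eq_false_iff]
    intro h
    rw [PySem.Str.isIn_iff_infix] at h
    simp [List.singleton_infix_iff] at h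
    simp_all
  · rw [PySem.Str.isIn_iff_infix]
    simp [List.singleton_infix_iff]
    simp_all

-- ===== VERDICT (by name: the statement is the Claim_ definition above) =====
theorem is_valid_java_class_name_py_spec : Claim_equal_is_valid_java_class_name_py := by
  intro s _
  unfold Spec_is_valid_java_class_name_py is_valid_java_class_name_py is_valid_java_class_name_py_alt
  rw [pvIsIn_eq, pvSplitOn_eq]
  have h := (pvAltGo_spec s.toList false).1
  rw [h]
  cases hc : s.toList.contains '.' <;> simp [pvCheckPart, Bool.and_comm]
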